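-- pv_equiv track=rewrite | github.com/iambeno1/2024-Codewars-Coding-Challenge | My Solutions/101_Simple letter removal.py | solve
-- ===== SOURCE A (Python) =====
-- def solve(st, k):
--     for char in sorted(set(st)):
--         count = st.count(char)
--         if k >= count:
--             st = st.replace(char, '', count)
--             k -= count
--         else:
--             st = st.replace(char, '', k)
--             break
--     return st
-- ===== SOURCE B (Python) =====
-- def solve(st, k):
--     freq = {}
--     for c in st:
--         freq[c] = freq.get(c, 0) + 1
--     remove = {}
--     for c in sorted(freq):
--         if k >= freq[c]:
--             remove[c] = freq[c]
--             k -= freq[c]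
--         else:
--             remove[c] = k
--             break
--     out = []
--     for c in st:
--         if remove.get(c, 0) != 0:
--             remove[c] -= 1
--         else:
--             out.append(c)
--     return ''.join(out)
-- ===== Notes on version B (the rewrite author's own statement) =====
-- stated objective: alternative
-- what changed: A repeatedly mutates the string (count + replace per distinct character); B counts all frequencies once, computes a per-character removal quota over the sorted distinct characters, and rebuilds the string in one final pass that decrements quotas.
import Mathlib
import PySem

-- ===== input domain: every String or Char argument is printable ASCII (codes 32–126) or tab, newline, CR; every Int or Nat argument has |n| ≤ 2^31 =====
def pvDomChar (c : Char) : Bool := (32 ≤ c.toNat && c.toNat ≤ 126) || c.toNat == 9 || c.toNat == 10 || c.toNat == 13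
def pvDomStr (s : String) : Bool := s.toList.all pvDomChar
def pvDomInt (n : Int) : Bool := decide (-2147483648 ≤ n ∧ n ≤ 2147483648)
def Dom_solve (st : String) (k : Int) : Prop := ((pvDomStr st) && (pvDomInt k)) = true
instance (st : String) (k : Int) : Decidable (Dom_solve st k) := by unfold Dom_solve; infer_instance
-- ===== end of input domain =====

-- B replaces A's per-character count/replace string mutation loop with: count frequencies once,
-- compute removal quotas over the sorted distinct characters, rebuild in one pass (objective: alternative).

-- ===== PORT A =====
-- hand port of st.replace(c, '', n) for a one-character old string and '' new string:
-- removes the first n occurrences of c; exact on this case incl. Python's rules that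
-- n = 0 removes nothing and a negative n removes all occurrences (n - 1 never reaches 0).
def replCount (cs : List Char) (c : Char) (n : Int) : List Char :=
  match cs with
  | [] => []
  | x :: xs =>
      if x = c then (if n = 0 then x :: xs else replCount xs c (n - 1))
      else x :: replCount xs c n

-- the 'for char in sorted(set(st))' loop of A, st and k threaded as state, break = return
def solveLoopA (chars : List Char) (cs : List Char) (k : Int) : List Char :=
  match chars with
  | [] => cs
  | ch :: rest =>
      let count : Int := (cs.count ch : Int)
      if k ≥ count then solveLoopA rest (replCount cs ch count) (k - count)
      else replCount cs ch k

def solve (st : String) (k : Int) : String :=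
  String.ofList
    (solveLoopA (PySem.List.sorted (PySem.Set.ofList st.toList) (fun x => x) false) st.toList k)

-- ===== PORT B =====
-- the 'for c in sorted(freq)' loop of Source B: fills the quota dict, break = return
def buildRemove (chars : List Char) (freq : PySem.Dict Char Int)
    (rem : PySem.Dict Char Int) (k : Int) : PySem.Dict Char Int :=
  match chars with
  | [] => rem
  | c :: rest =>
      let f := freq.getD c 0
      if k ≥ f then buildRemove rest freq (rem.insert c f) (k - f)
      else rem.insert c k

def solve_alt (st : String) (k : Int) : String :=
  -- freq = {}; for c in st: freq[c] = freq.get(c, 0) + 1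
  let freq : PySem.Dict Char Int :=
    st.toList.foldl (fun d c => d.insert c (d.getD c 0 + 1)) PySem.Dict.empty
  let rem := buildRemove (PySem.List.sorted freq.keys (fun x => x) false) freq PySem.Dict.empty k
  -- out = []; for c in st: pop a quota or append c
  let out := st.toList.foldl
      (fun (s : PySem.Dict Char Int × List Char) c =>
        if s.1.getD c 0 ≠ 0 then (s.1.insert c (s.1.getD c 0 - 1), s.2)
        else (s.1, s.2 ++ [c]))
      (rem, ([] : List Char))
  String.ofList out.2  -- ''.join(out): out holds single characters

-- ===== PRECONDITION & SPEC =====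
def Spec_solve (st : String) (k : Int) (out : String) : Prop := out = solve_alt st k
instance (st : String) (k : Int) (out : String) : Decidable (Spec_solve st k out) := by
  unfold Spec_solve; infer_instance

-- ===== CLAIM (what is proved, stated in full; the proofs are below) =====
def Claim_equal_solve : Prop := ∀ (st : String) (k : Int), Dom_solve st k → Spec_solve st k (solve st k)

-- ===== LEMMAS AND PROOFS =====

-- recursive form of Source B's final pass (produced output only)
def emitR (cs : List Char) (d : PySem.Dict Char Int) : List Char :=
  match cs with
  | [] => []
  | x :: xs =>
      if d.getD x 0 ≠ 0 then emitR xs (d.insert x (d.getD x 0 - 1)) else x :: emitR xs d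

theorem getD_insert_comm (d : PySem.Dict Char Int) (a b x : Char) (u v : Int) (hab : a ≠ b) :
    ((d.insert a u).insert b v).getD x 0 = ((d.insert b v).insert a u).getD x 0 := by
  by_cases hxb : x = b <;> by_cases hxa : x = a <;>
    simp_all [PySem.Dict.getD_insert]

theorem foldl_emit (cs : List Char) (d : PySem.Dict Char Int) (acc : List Char) :
    (cs.foldl
      (fun (s : PySem.Dict Char Int × List Char) c =>
        if s.1.getD c 0 ≠ 0 then (s.1.insert c (s.1.getD c 0 - 1), s.2)
        else (s.1, s.2 ++ [c]))
      (d, acc)).2 = acc ++ emitR cs d := by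
  induction cs generalizing d acc with
  | nil => simp [emitR]
  | cons x xs ih =>
      simp only [List.foldl_cons, emitR]
      by_cases h : d.getD x 0 ≠ 0
      · rw [if_pos h, if_pos h]; exact ih _ _
      · rw [if_neg h, if_neg h, ih]; simp

theorem emitR_congr (cs : List Char) (d₁ d₂ : PySem.Dict Char Int)
    (h : ∀ a, d₁.getD a 0 = d₂.getD a 0) : emitR cs d₁ = emitR cs d₂ := by
  induction cs generalizing d₁ d₂ with
  | nil => rfl
  | cons x xs ih =>
      simp only [emitR, h x]
      by_cases hx : d₂.getD x 0 ≠ 0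
      · rw [if_pos hx, if_pos hx]
        exact ih _ _ (fun a => by
          by_cases ha : a = x <;> simp [PySem.Dict.getD_insert, ha, h a])
      · rw [if_neg hx, if_neg hx, ih _ _ h]

theorem emitR_id (cs : List Char) (d : PySem.Dict Char Int)
    (h : ∀ a, d.getD a 0 = 0) : emitR cs d = cs := by
  induction cs with
  | nil => rfl
  | cons x xs ih => simp [emitR, h x, ih]

theorem getD_empty (a : Char) : (PySem.Dict.empty : PySem.Dict Char Int).getD a 0 = 0 := rfl

theorem count_replCount_ne (cs : List Char) (c : Char) (n : Int) (x : Char) (hx : x ≠ c) :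
    (replCount cs c n).count x = cs.count x := by
  induction cs generalizing n with
  | nil => rfl
  | cons y ys ih =>
      by_cases hy : y = c
      · subst hy
        by_cases hn : n = 0
        · simp [replCount, hn]
        · simp [replCount, hn, ih, Ne.symm hx]
      · simp [replCount, hy, List.count_cons, ih]

-- pulling one insert through Source B's final pass
theorem emitR_cons (x : Char) (xs : List Char) (d : PySem.Dict Char Int) :
    emitR (x :: xs) d
      = if d.getD x 0 ≠ 0 then emitR xs (d.insert x (d.getD x 0 - 1)) else x :: emitR xs d := rfl

theorem replCount_cons (x : Char) (xs : List Char) (c : Char) (n : Int) :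
    replCount (x :: xs) c n
      = if x = c then (if n = 0 then x :: xs else replCount xs c (n - 1))
        else x :: replCount xs c n := rfl

theorem emitR_insert (cs : List Char) (d : PySem.Dict Char Int) (c : Char) (n : Int)
    (hc : d.getD c 0 = 0) : emitR cs (d.insert c n) = emitR (replCount cs c n) d := by
  induction cs generalizing d n with
  | nil => rfl
  | cons x xs ih =>
      rw [emitR_cons, replCount_cons]
      by_cases hx : x = c
      · subst hx
        rw [if_pos rfl]
        have hg : (d.insert x n).getD x 0 = n := by simp
        rw [hg]
        by_cases hn : n = 0
        · rw [if_pos hn, if_neg (by simp [hn]), emitR_cons, if_neg (by simp [hc])]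
          exact congrArg _ (emitR_congr xs _ d (fun a => by
            by_cases ha : a = x <;> simp [PySem.Dict.getD_insert, ha, hn, hc]))
        · rw [if_neg hn, if_pos hn]
          rw [emitR_congr xs _ (d.insert x (n - 1)) (fun a => by
            by_cases ha : a = x <;> simp [PySem.Dict.getD_insert, ha])]
          exact ih _ _ hc
      · rw [if_neg hx]
        have hg : (d.insert c n).getD x 0 = d.getD x 0 := by
          simp [PySem.Dict.getD_insert, hx]
        rw [hg, emitR_cons]
        by_cases hr : d.getD x 0 ≠ 0
        · rw [if_pos hr, if_pos hr]
          rw [emitR_congr xs _ ((d.insert x (d.getD x 0 - 1)).insert c n)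
                (fun a => getD_insert_comm d c x a n _ (fun h => hx h.symm))]
          refine ih _ _ ?_
          rw [PySem.Dict.getD_insert, if_neg (fun h => hx h.symm)]
          exact hc
        · rw [if_neg hr, if_neg hr]
          exact congrArg _ (ih _ _ hc)

-- buildRemove never touches keys outside its char list
theorem buildRemove_getD_notMem (chars : List Char) (freq d : PySem.Dict Char Int) (k : Int)
    (c : Char) (hc : c ∉ chars) : (buildRemove chars freq d k).getD c 0 = d.getD c 0 := by
  induction chars generalizing d k with
  | nil => rfl
  | cons y ys ih =>
      have hy : c ≠ y := fun h => hc (h ▸ List.mem_cons_self ..)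
      have hys : c ∉ ys := fun h => hc (List.mem_cons_of_mem _ h)
      simp only [buildRemove]
      by_cases hk : k ≥ freq.getD y 0
      · rw [if_pos hk, ih _ _ hys, PySem.Dict.getD_insert, if_neg hy]
      · rw [if_neg hk, PySem.Dict.getD_insert, if_neg hy]

-- buildRemove depends on its accumulator only pointwise
theorem buildRemove_congr (chars : List Char) (freq d₁ d₂ : PySem.Dict Char Int) (k : Int)
    (h : ∀ a, d₁.getD a 0 = d₂.getD a 0) :
    ∀ a, (buildRemove chars freq d₁ k).getD a 0 = (buildRemove chars freq d₂ k).getD a 0 := by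
  induction chars generalizing d₁ d₂ k with
  | nil => exact h
  | cons y ys ih =>
      intro a
      simp only [buildRemove]
      by_cases hk : k ≥ freq.getD y 0
      · rw [if_pos hk, if_pos hk]
        exact ih _ _ _ (fun b => by
          by_cases hb : b = y <;> simp [PySem.Dict.getD_insert, hb, h b]) a
      · rw [if_neg hk, if_neg hk, PySem.Dict.getD_insert, PySem.Dict.getD_insert]
        by_cases hb : a = y
        · rw [if_pos hb, if_pos hb]
        · rw [if_neg hb, if_neg hb]; exact h a

-- an insert of a key not in the char list commutes out of buildRemove (pointwise)
theorem buildRemove_insert (chars : List Char) (freq d : PySem.Dict Char Int) (k : Int)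
    (c : Char) (v : Int) (hc : c ∉ chars) :
    ∀ a, (buildRemove chars freq (d.insert c v) k).getD a 0
        = ((buildRemove chars freq d k).insert c v).getD a 0 := by
  induction chars generalizing d k with
  | nil => intro a; rfl
  | cons y ys ih =>
      have hy : c ≠ y := fun h => hc (h ▸ List.mem_cons_self ..)
      have hys : c ∉ ys := fun h => hc (List.mem_cons_of_mem _ h)
      intro a
      simp only [buildRemove]
      by_cases hk : k ≥ freq.getD y 0
      · rw [if_pos hk, if_pos hk]
        rw [buildRemove_congr ys freq ((d.insert c v).insert y (freq.getD y 0))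
              ((d.insert y (freq.getD y 0)).insert c v) _
              (fun b => getD_insert_comm d c y b v _ hy) a]
        exact ih _ _ hys a
      · rw [if_neg hk, if_neg hk]
        exact getD_insert_comm d c y a v k hy

-- the main loop correspondence
theorem main_loop (L : List Char) (cs : List Char) (k : Int) (freq : PySem.Dict Char Int)
    (hnd : L.Nodup) (hfreq : ∀ c ∈ L, freq.getD c 0 = (cs.count c : Int)) :
    solveLoopA L cs k = emitR cs (buildRemove L freq PySem.Dict.empty k) := by
  induction L generalizing cs k with
  | nil => exact (emitR_id cs _ getD_empty).symm
  | cons c rest ih =>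
      have hcrest : c ∉ rest := (List.nodup_cons.mp hnd).1
      have hcnt : freq.getD c 0 = (cs.count c : Int) := hfreq c (List.mem_cons_self ..)
      simp only [solveLoopA, buildRemove, hcnt]
      by_cases hk : k ≥ (cs.count c : Int)
      · rw [if_pos hk, if_pos hk]
        rw [emitR_congr cs _
              ((buildRemove rest freq PySem.Dict.empty (k - (cs.count c : Int))).insert c
                (cs.count c : Int))
              (buildRemove_insert rest freq PySem.Dict.empty _ c _ hcrest)]
        rw [emitR_insert cs _ c _ (by
          rw [buildRemove_getD_notMem rest freq PySem.Dict.empty _ c hcrest]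
          exact getD_empty c)]
        exact ih (replCount cs c (cs.count c : Int)) (k - (cs.count c : Int))
          (List.nodup_cons.mp hnd).2 (fun x hx => by
            have hxc : x ≠ c := fun h => hcrest (h ▸ hx)
            rw [hfreq x (List.mem_cons_of_mem _ hx),
              count_replCount_ne cs c _ x hxc])
      · rw [if_neg hk, if_neg hk]
        rw [emitR_insert cs PySem.Dict.empty c k (getD_empty c)]
        exact (emitR_id _ _ getD_empty).symm

-- ===== VERDICT (by name: the statement is the Claim_ definition above) =====
theorem solve_spec : Claim_equal_solve := by
  intro st k _
  show solve st k = solve_alt st k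
  have hfreq : st.toList.foldl (fun d c => d.insert c (d.getD c 0 + 1)) PySem.Dict.empty
      = PySem.Dict.counter st.toList := by
    simp [PySem.Dict.counter, PySem.Dict.modify]
  simp only [solve, solve_alt, hfreq, PySem.Dict.keys_counter, foldl_emit, List.nil_append]
  exact congrArg String.ofList (main_loop _ _ _ _
    (((PySem.List.sorted_perm (PySem.Set.ofList st.toList) (fun x => x) false).nodup_iff).mpr
      (PySem.Set.nodup_ofList st.toList))
    (fun c _ => PySem.Dict.getD_counter st.toList c))
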